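-- pv_equiv track=rewrite | github.com/mariabrinzila/Tutorials | Exercises/Word-Ladder2/main.py | process_words
-- ===== SOURCE A (Python) =====
-- def process_words(word_list):
--     """
--     :param word_list: the array of strings representing the dictionary (the words that we can
--         use in the sequence between the beginning and end word)
--     :return: the hash map containing all the intermediate words of each word as the keys and
--         all the words that share the intermediate word key as the values
--     """
--     # Time complexity <=> O(n * m * m), where n is the size of the array
--     # And m is the size of each string (each word has m substrings)
--     # Space complexity <=> O(n * m * m) (each word of size m will be put as a value in all m substrings)
--
--     # For each word in the array of words (the dictionary of words):
--     # Compute all intermediate words by putting a * instead of each letter of the current word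
--     # Add the current word in the array of values for each intermediate word (the key)
--     hash_map = dict()
--
--     for word in word_list:
--         m = len(word)
--
--         for i in range(m):
--             intermediate_word = word[:i] + "*" + word[(i + 1):]
--
--             if hash_map.get(intermediate_word) is not None:
--                 hash_map[intermediate_word].append(word)
--             else:
--                 hash_map[intermediate_word] = [word]
--
--     return hash_map
-- ===== SOURCE B (Python) =====
-- def process_words(word_list):
--     """Divide and conquer: build the pattern map of each half recursively,
--     then merge the two maps (left groups first, right groups appended)."""
--     n = len(word_list)
--     if n == 0:
--         return {}
--     if n == 1:
--         word = word_list[0]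
--         out = {}
--         for i in range(len(word)):
--             p = word[:i] + "*" + word[i + 1:]
--             out[p] = out.get(p, []) + [word]
--         return out
--     mid = n // 2
--     out = process_words(word_list[:mid])
--     for p, group in process_words(word_list[mid:]).items():
--         out[p] = out.get(p, []) + group
--     return out
-- ===== Notes on version B (the rewrite author's own statement) =====
-- stated objective: alternative
-- what changed: A fills one dict in a single forward pass with an append-or-create branch per pattern; B is divide-and-conquer: it recursively builds the pattern map of each half of the word list and merges the right map into the left one, so the result is assembled by merging sub-maps instead of by sequential insertion.
import Mathlib
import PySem

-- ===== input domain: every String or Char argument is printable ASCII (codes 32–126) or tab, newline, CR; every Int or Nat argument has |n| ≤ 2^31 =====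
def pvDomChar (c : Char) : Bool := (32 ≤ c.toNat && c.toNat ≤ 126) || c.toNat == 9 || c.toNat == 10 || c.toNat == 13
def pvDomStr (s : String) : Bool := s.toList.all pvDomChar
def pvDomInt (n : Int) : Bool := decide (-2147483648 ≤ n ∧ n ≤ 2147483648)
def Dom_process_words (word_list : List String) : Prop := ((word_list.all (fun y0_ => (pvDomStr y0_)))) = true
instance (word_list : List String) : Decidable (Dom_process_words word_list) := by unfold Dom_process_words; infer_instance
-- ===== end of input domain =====

-- B replaces A's single forward insertion pass by divide and conquer: the pattern map of
-- each half of the word list is built recursively and the right map is merged into the left.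

-- ===== PORT A =====
-- word[:i] + "*" + word[i+1:]  (both Pythons spell this expression the same way)
def pvPattern (w : String) (i : Int) : String :=
  String.ofList (PySem.List.slice w.toList none (some i) ++ ['*'] ++
    PySem.List.slice w.toList (some (i + 1)) none)

def process_words (word_list : List String) : List (String × List String) :=
  (word_list.foldl (fun hash_map word =>
      (PySem.List.pyRange 0 (PySem.Str.len word) 1).foldl (fun hash_map i =>
        let iw := pvPattern word i
        if (hash_map.get? iw).isSome then
          hash_map.insert iw (hash_map.getD iw [] ++ [word])
        else
          hash_map.insert iw [word]) hash_map)
    PySem.Dict.empty).items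

-- ===== PORT B =====
-- the recursive dict-building core of Source B (its return value's .items is process_words_alt)
def pwAltBuild (word_list : List String) : PySem.Dict String (List String) :=
  if word_list.length = 0 then PySem.Dict.empty
  else if word_list.length = 1 then
    let word := word_list.headI          -- word_list[0]; the list is nonempty in this branch
    (PySem.List.pyRange 0 (PySem.Str.len word) 1).foldl (fun out i =>
      let p := pvPattern word i
      out.insert p (out.getD p [] ++ [word])) PySem.Dict.empty
  else
    -- mid = n // 2; out = recursive left map; the loop folds the right map's items into it
    ((pwAltBuild (PySem.List.slice word_list
        (some (PySem.Int.floordiv (word_list.length : Int) 2)) none)).items).foldl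
      (fun out pg => out.insert pg.1 (out.getD pg.1 [] ++ pg.2))
      (pwAltBuild (PySem.List.slice word_list none
        (some (PySem.Int.floordiv (word_list.length : Int) 2))))
termination_by word_list.length
decreasing_by
  · rw [show PySem.Int.floordiv (word_list.length : Int) 2 = ((word_list.length / 2 : Nat) : Int) from
      PySem.Int.floordiv_natCast _ 2, PySem.List.slice_to_natCast, List.length_take]
    omega
  · rw [show PySem.Int.floordiv (word_list.length : Int) 2 = ((word_list.length / 2 : Nat) : Int) from
      PySem.Int.floordiv_natCast _ 2, PySem.List.slice_from_natCast, List.length_drop]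
    omega

def process_words_alt (word_list : List String) : List (String × List String) :=
  (pwAltBuild word_list).items

-- ===== PRECONDITION & SPEC =====
def Spec_process_words (word_list : List String) (out : List (String × List String)) : Prop := out = process_words_alt word_list
instance (word_list : List String) (out : List (String × List String)) : Decidable (Spec_process_words word_list out) := by unfold Spec_process_words; infer_instance

-- ===== CLAIM (what is proved, stated in full; the proofs are below) =====
def Claim_equal_process_words : Prop := ∀ (word_list : List String), Dom_process_words word_list → Spec_process_words word_list (process_words word_list)

-- ===== LEMMAS AND PROOFS =====

-- the flat (pattern, word) pair list of a word list
def pvPairs (word_list : List String) : List (String × String) :=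
  word_list.flatMap (fun w =>
    (PySem.List.pyRange 0 (PySem.Str.len w) 1).map (fun i => (pvPattern w i, w)))

-- the canonical grouping fold both programs reduce to
def pvBuild (ps : List (String × String)) (d : PySem.Dict String (List String)) :
    PySem.Dict String (List String) :=
  ps.foldl (fun d p => d.modify p.1 [] (· ++ [p.2])) d

-- A's if/else step (append to existing group or start a new one) is Dict.modify
theorem pvStep_eq_modify (d : PySem.Dict String (List String)) (iw w : String) :
    (if (d.get? iw).isSome then d.insert iw (d.getD iw [] ++ [w])
     else d.insert iw [w]) = d.modify iw [] (· ++ [w]) := by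
  simp only [PySem.Dict.modify]
  cases h : d.get? iw with
  | some v => simp [PySem.Dict.getD, h]
  | none => simp [PySem.Dict.getD, h]

-- A's nested loop is the grouping fold over the flat pair list
theorem pvA_eq (word_list : List String) :
    word_list.foldl (fun hash_map word =>
        (PySem.List.pyRange 0 (PySem.Str.len word) 1).foldl (fun hash_map i =>
          let iw := pvPattern word i
          if (hash_map.get? iw).isSome then
            hash_map.insert iw (hash_map.getD iw [] ++ [word])
          else
            hash_map.insert iw [word]) hash_map)
      PySem.Dict.empty
    = pvBuild (pvPairs word_list) PySem.Dict.empty := by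
  unfold pvBuild pvPairs
  rw [List.foldl_flatMap]
  congr 1
  funext d w
  rw [List.foldl_map]
  congr 1
  funext d i
  exact pvStep_eq_modify d (pvPattern w i) w

-- lookup-with-default through a fold of list-valued modifies (general appended lists)
theorem pvGetD_foldl_modify_flatten (l : List (String × List String))
    (m : PySem.Dict String (List String)) (c : String) :
    (l.foldl (fun d p => d.modify p.1 [] (· ++ p.2)) m).getD c []
      = m.getD c [] ++ ((l.filter (fun p => p.1 == c)).map (·.2)).flatten := by
  induction l generalizing m with
  | nil => simp
  | cons p t ih =>
    simp only [List.foldl_cons, ih, List.filter_cons]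
    rw [PySem.Dict.getD_modify]
    by_cases h : c = p.1
    · simp [h, List.append_assoc]
    · have h2 : ¬ (p.1 == c) = true := by
        simp only [beq_iff_eq]
        exact fun hh => h hh.symm
      rw [if_neg h, if_neg h2]

-- pvBuild facts, instances of the PySem grouping-loop lemmas
theorem pvBuild_keys_nodup (ps : List (String × String)) (d : PySem.Dict String (List String))
    (hd : d.keys.Nodup) : (pvBuild ps d).keys.Nodup := by
  unfold pvBuild
  exact PySem.Dict.nodup_keys_foldl_modify_key ps (·.1) [] (fun _ p => (· ++ [p.2])) d hd

theorem pvBuild_keys (ps : List (String × String)) (d : PySem.Dict String (List String)) :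
    (pvBuild ps d).keys = PySem.Set.update d.keys (ps.map (·.1)) := by
  unfold pvBuild
  exact PySem.Dict.keys_foldl_modify_key ps (·.1) [] (fun _ p => (· ++ [p.2])) d

theorem pvBuild_getD (ps : List (String × String)) (d : PySem.Dict String (List String))
    (c : String) :
    (pvBuild ps d).getD c [] = d.getD c [] ++ (ps.filter (fun p => p.1 == c)).map (·.2) := by
  unfold pvBuild
  exact PySem.Dict.getD_foldl_modify_append ps d c

-- a Nodup list filtered for equality with c is [c] or []
theorem pvFilter_beq_of_nodup (l : List String) (hl : l.Nodup) (c : String) :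
    l.filter (· == c) = if c ∈ l then [c] else [] := by
  induction l with
  | nil => simp
  | cons x t ih =>
    simp only [List.nodup_cons] at hl
    rw [List.filter_cons]
    by_cases h : x = c
    · subst h
      simp [hl.1, ih hl.2]
    · simp only [beq_iff_eq, h, List.mem_cons]
      rw [ih hl.2]
      simp [Ne.symm h]

-- merging the grouped items of one grouping fold into a dict replays its flat pairs
theorem pvMergeBuild (qs : List (String × String)) (m : PySem.Dict String (List String))
    (hm : m.keys.Nodup) :
    ((pvBuild qs PySem.Dict.empty).items).foldl
        (fun out pg => out.modify pg.1 [] (· ++ pg.2)) m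
      = pvBuild qs m := by
  have hq : (pvBuild qs PySem.Dict.empty).keys.Nodup := pvBuild_keys_nodup qs _ (by simp)
  have hqkeys : (pvBuild qs PySem.Dict.empty).keys = PySem.Set.ofList (qs.map (·.1)) := by
    rw [pvBuild_keys]
    simp [PySem.Set.update_nil_left]
  have hndL : ((pvBuild qs PySem.Dict.empty).items.foldl
      (fun out pg => out.modify pg.1 [] (· ++ pg.2)) m).keys.Nodup :=
    PySem.Dict.nodup_keys_foldl_modify_key ((pvBuild qs PySem.Dict.empty).items)
      (fun (pg : String × List String) => pg.1) []
      (fun (_ : PySem.Dict String (List String)) (pg : String × List String) => (· ++ pg.2)) m hm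
  have hndR : (pvBuild qs m).keys.Nodup := pvBuild_keys_nodup qs m hm
  apply PySem.Dict.ext
  rw [PySem.Dict.items_eq_map_keys _ hndL ([] : List String),
      PySem.Dict.items_eq_map_keys _ hndR ([] : List String)]
  -- the key lists agree
  have hkeys : ((pvBuild qs PySem.Dict.empty).items.foldl
      (fun out pg => out.modify pg.1 [] (· ++ pg.2)) m).keys = (pvBuild qs m).keys := by
    rw [PySem.Dict.keys_foldl_modify_key ((pvBuild qs PySem.Dict.empty).items)
        (fun (pg : String × List String) => pg.1) []
        (fun (_ : PySem.Dict String (List String)) (pg : String × List String) => (· ++ pg.2)),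
      pvBuild_keys]
    have h1 : (pvBuild qs PySem.Dict.empty).items.map (·.1)
        = (pvBuild qs PySem.Dict.empty).keys := rfl
    rw [h1, hqkeys,
        PySem.Set.update_eq_append_filter, PySem.Set.update_eq_append_filter,
        PySem.Set.ofList_ofList]
  rw [hkeys]
  -- the lookups agree
  refine List.map_congr_left (fun k _ => ?_)
  rw [pvGetD_foldl_modify_flatten, pvBuild_getD]
  congr 1
  -- items of the built dict, filtered at k, flatten to the filtered pairs
  rw [PySem.Dict.items_eq_map_keys _ hq ([] : List String), List.filter_map]
  have hcomp : ((fun p => p.1 == k) ∘ fun k' => (k', (pvBuild qs PySem.Dict.empty).getD k' []))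
      = (· == k) := rfl
  rw [hcomp, hqkeys, pvFilter_beq_of_nodup _ (PySem.Set.nodup_ofList _) k]
  by_cases hk : k ∈ PySem.Set.ofList (qs.map (·.1))
  · simp only [hk, if_pos, List.map_cons, List.map_nil, List.flatten_cons, List.flatten_nil,
      List.append_nil]
    rw [pvBuild_getD]
    simp
  · rw [if_neg hk]
    have h0 : qs.filter (fun p => p.1 == k) = [] := by
      rw [List.filter_eq_nil_iff]
      intro p hp hbeq
      apply hk
      rw [PySem.Set.mem_ofList]
      exact List.mem_map.2 ⟨p, hp, by simpa using hbeq⟩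
    simp [h0]

-- B's recursion computes the grouping fold of the flat pair list
theorem pvAltBuild_eq : ∀ n (word_list : List String), word_list.length = n →
    pwAltBuild word_list = pvBuild (pvPairs word_list) PySem.Dict.empty := by
  intro n
  induction n using Nat.strong_induction_on with
  | _ n ih =>
    intro ws hlen
    rw [pwAltBuild]
    by_cases h0 : ws.length = 0
    · rw [if_pos h0]
      rw [List.length_eq_zero_iff] at h0
      subst h0
      rfl
    · rw [if_neg h0]
      by_cases h1 : ws.length = 1
      · rw [if_pos h1]
        obtain ⟨w, hw⟩ := List.length_eq_one_iff.1 h1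
        subst hw
        simp only [List.headI]
        unfold pvPairs pvBuild
        rw [List.flatMap_cons, List.flatMap_nil, List.append_nil, List.foldl_map]
        rfl
      · rw [if_neg h1]
        have h2 : 2 ≤ ws.length := by omega
        rw [show PySem.Int.floordiv (ws.length : Int) 2 = ((ws.length / 2 : Nat) : Int) from
          PySem.Int.floordiv_natCast _ 2, PySem.List.slice_to_natCast, PySem.List.slice_from_natCast]
        have hL : (ws.take (ws.length / 2)).length < n := by
          rw [List.length_take]; omega
        have hR : (ws.drop (ws.length / 2)).length < n := by
          rw [List.length_drop]; omega
        rw [ih _ hL _ rfl, ih _ hR _ rfl]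
        have hnd : (pvBuild (pvPairs (ws.take (ws.length / 2))) PySem.Dict.empty).keys.Nodup :=
          pvBuild_keys_nodup _ _ (by simp)
        have hins : (fun (out : PySem.Dict String (List String)) (pg : String × List String) =>
            out.insert pg.1 (out.getD pg.1 [] ++ pg.2))
            = fun (out : PySem.Dict String (List String)) (pg : String × List String) =>
                out.modify pg.1 [] (· ++ pg.2) := rfl
        rw [hins, pvMergeBuild _ _ hnd]
        unfold pvBuild pvPairs
        rw [← List.foldl_append, ← List.flatMap_append, List.take_append_drop]

-- ===== VERDICT (by name: the statement is the Claim_ definition above) =====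
theorem process_words_spec : Claim_equal_process_words := by
  intro word_list _
  unfold Spec_process_words process_words process_words_alt
  rw [pvA_eq, pvAltBuild_eq word_list.length word_list rfl]
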